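-- pv_equiv track=rewrite | github.com/yegeb/Basketball_Project | src/pass_and_interception/pass_and_interception_detector.py | detect_passes
-- ===== SOURCE A (Python) =====
-- from typing import List, Dict, Any
--
-- def detect_passes(ball_acquisition: List[int], player_teams: List[Dict[int, int]]) -> List[int]:
--     """
--     Detects passes based on changes in ball possession between players of the same team.
--
--     Args:
--         ball_acquisition (List[int]): A list where each index is a frame number and each value
--                                       is the player_id holding the ball in that frame (-1 if none).
--         player_teams (List[Dict[int, int]]): A list where each index is a frame number and each
--                                              value is a dictionary mapping player_id to team_id.
--
--     Returns:
--         List[int]: A list of same length as `ball_acquisition`, where each index contains the team_id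
--                    if a pass occurred at that frame, otherwise -1.
--     """
--     passes = [-1] * len(ball_acquisition)  # Initialize all frames as no-pass (-1)
--     prev_holder    = -1  # Last known player holding the ball
--     prev_frame_num = -1  # Frame number of previous holder
--
--     for frame_num in range(1, len(ball_acquisition)):
--         # Update previous holder if there was valid possession in the previous frame
--         if ball_acquisition[frame_num - 1] != -1:
--             prev_holder = ball_acquisition[frame_num - 1]
--             prev_frame_num = frame_num - 1
--
--         cur_holder = ball_acquisition[frame_num]
--
--         # Check if valid transition occurred: different player now holds the ball
--         if prev_frame_num != -1 and cur_holder != -1 and prev_holder != cur_holder: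
--             # Get team IDs of previous and current ball holders
--             prev_team = player_teams[prev_frame_num].get(prev_holder, -1)
--             cur_team = player_teams[frame_num].get(cur_holder, -1)
--
--             # If same team and valid team IDs, it's a pass
--             if prev_team == cur_team and prev_team != -1:
--                 passes[frame_num] = prev_team  # Mark pass at this frame
--
--     return passes
-- ===== SOURCE B (Python) =====
-- from typing import List, Dict
--
-- def detect_passes(ball_acquisition: List[int], player_teams: List[Dict[int, int]]) -> List[int]:
--     def mark(j):
--         if ball_acquisition[j] == -1:
--             return -1
--         for i in range(j - 1, -1, -1):
--             if ball_acquisition[i] != -1: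
--                 if ball_acquisition[i] == ball_acquisition[j]:
--                     return -1
--                 prev_team = player_teams[i].get(ball_acquisition[i], -1)
--                 cur_team = player_teams[j].get(ball_acquisition[j], -1)
--                 return prev_team if prev_team == cur_team and prev_team != -1 else -1
--         return -1
--     return [mark(j) for j in range(len(ball_acquisition))]
-- ===== Notes on version B (the rewrite author's own statement) =====
-- stated objective: alternative
-- what changed: B drops A's carried prev_holder/prev_frame state entirely: each output element is computed independently by a per-frame backward scan to the nearest earlier valid possession frame, so the result is a stateless map over frames instead of a single stateful forward loop.
import Mathlib
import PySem

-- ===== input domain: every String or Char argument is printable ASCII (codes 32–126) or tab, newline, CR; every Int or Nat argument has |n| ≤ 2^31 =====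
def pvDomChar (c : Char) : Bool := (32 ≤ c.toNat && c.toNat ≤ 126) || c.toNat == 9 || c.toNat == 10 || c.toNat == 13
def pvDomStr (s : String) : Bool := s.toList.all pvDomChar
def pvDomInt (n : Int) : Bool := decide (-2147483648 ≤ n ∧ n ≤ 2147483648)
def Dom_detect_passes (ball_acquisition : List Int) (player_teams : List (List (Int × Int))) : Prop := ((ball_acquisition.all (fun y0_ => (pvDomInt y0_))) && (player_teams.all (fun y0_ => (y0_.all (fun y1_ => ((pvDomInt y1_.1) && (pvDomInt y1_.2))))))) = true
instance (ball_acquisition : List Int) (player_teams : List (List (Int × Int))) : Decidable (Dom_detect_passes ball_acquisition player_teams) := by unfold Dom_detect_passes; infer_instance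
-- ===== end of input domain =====

-- B replaces A's stateful forward loop (carried prev_holder/prev_frame) by a stateless
-- per-frame backward scan to the nearest earlier valid frame; equal return value on Pre_.

-- ===== PORT A =====
-- dict.get(k, -1) on an association list: first matching key, default -1 (shared by both ports)
def pvGetTeam (row : List (Int × Int)) (k : Int) : Int :=
  match row.find? (fun p => p.1 == k) with
  | some p => p.2
  | none => -1

-- loop body of A: state = (passes, prev_holder, prev_frame_num)
def pvStepA (ba : List Int) (pt : List (List (Int × Int)))
    (st : List Int × Int × Int) (fn : Int) : List Int × Int × Int :=
  let p : Int × Int :=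
    if (PySem.List.pyGet? ba (fn - 1)).getD (-1) ≠ -1 then
      ((PySem.List.pyGet? ba (fn - 1)).getD (-1), fn - 1)
    else (st.2.1, st.2.2)
  let cur : Int := (PySem.List.pyGet? ba fn).getD (-1)
  if p.2 ≠ -1 ∧ cur ≠ -1 ∧ p.1 ≠ cur then
    let prev_team := pvGetTeam ((PySem.List.pyGet? pt p.2).getD []) p.1
    let cur_team := pvGetTeam ((PySem.List.pyGet? pt fn).getD []) cur
    if prev_team = cur_team ∧ prev_team ≠ -1 then
      (st.1.set fn.toNat prev_team, p.1, p.2)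
    else (st.1, p.1, p.2)
  else (st.1, p.1, p.2)

-- the whole loop of A, kept as a helper so the proofs can speak about the final state
def pvFullA (ba : List Int) (pt : List (List (Int × Int))) : List Int × Int × Int :=
  (PySem.List.pyRange 1 (ba.length : Int) 1).foldl (pvStepA ba pt)
    (List.replicate ba.length (-1), -1, -1)

def detect_passes (ball_acquisition : List Int) (player_teams : List (List (Int × Int))) : List Int :=
  (pvFullA ball_acquisition player_teams).1

-- ===== PORT B =====
-- the inner 'for i in range(j-1, -1, -1)' of B's mark(j): returns at the first valid frame
def pvMarkLoop (ba : List Int) (pt : List (List (Int × Int))) (j bj : Int) : List Int → Int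
  | [] => -1
  | i :: rest =>
    let bi := (PySem.List.pyGet? ba i).getD (-1)
    if bi ≠ -1 then
      if bi = bj then -1
      else
        let prev_team := pvGetTeam ((PySem.List.pyGet? pt i).getD []) bi
        let cur_team := pvGetTeam ((PySem.List.pyGet? pt j).getD []) bj
        if prev_team = cur_team ∧ prev_team ≠ -1 then prev_team else -1
    else pvMarkLoop ba pt j bj rest

-- B's mark(j): the pass value at frame j, computed independently of all other frames
def pvMark (ba : List Int) (pt : List (List (Int × Int))) (j : Int) : Int :=
  if (PySem.List.pyGet? ba j).getD (-1) = -1 then -1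
  else pvMarkLoop ba pt j ((PySem.List.pyGet? ba j).getD (-1))
    (PySem.List.pyRange (j - 1) (-1) (-1))

def detect_passes_alt (ball_acquisition : List Int) (player_teams : List (List (Int × Int))) : List Int :=
  (PySem.List.pyRange 0 (ball_acquisition.length : Int) 1).map
    (pvMark ball_acquisition player_teams)

-- ===== PRECONDITION & SPEC =====
-- Pre_ excludes exactly the inputs on which the Python A raises IndexError: a possession
-- transition between consecutive valid frames whose later frame is outside player_teams.
def Pre_detect_passes (ball_acquisition : List Int) (player_teams : List (List (Int × Int))) : Prop :=
  ∀ j, j < ball_acquisition.length → ∀ i, i < j →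
    (ball_acquisition.getD i 0 ≠ -1 ∧ ball_acquisition.getD j 0 ≠ -1 ∧
      ball_acquisition.getD i 0 ≠ ball_acquisition.getD j 0 ∧
      (∀ k, k < j → i < k → ball_acquisition.getD k 0 = -1)) →
    j < player_teams.length

instance (ball_acquisition : List Int) (player_teams : List (List (Int × Int))) : Decidable (Pre_detect_passes ball_acquisition player_teams) := by
  unfold Pre_detect_passes; infer_instance

def pvWitness_detect_passes : List Int × (List (List (Int × Int))) :=
  ([1, -1, 2], [[(1, 5)], [], [(2, 5)]])

def Spec_detect_passes (ball_acquisition : List Int) (player_teams : List (List (Int × Int))) (out : List Int) : Prop := out = detect_passes_alt ball_acquisition player_teams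
instance (ball_acquisition : List Int) (player_teams : List (List (Int × Int))) (out : List Int) : Decidable (Spec_detect_passes ball_acquisition player_teams out) := by unfold Spec_detect_passes; infer_instance

-- ===== CLAIM (what is proved, stated in full; the proofs are below) =====
def Claim_equal_detect_passes : Prop := ∀ (ball_acquisition : List Int) (player_teams : List (List (Int × Int))), Dom_detect_passes ball_acquisition player_teams → Pre_detect_passes ball_acquisition player_teams → Spec_detect_passes ball_acquisition player_teams (detect_passes ball_acquisition player_teams)

-- ===== LEMMAS AND PROOFS =====

-- valid possession frames of a list, used only by the proofs to describe both loops
def pvValid (ba : List Int) : List (Int × Int) :=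
  (PySem.List.enumerate ba).filter (fun p => p.2 != -1)

-- encode "last valid frame so far" as A's (prev_holder, prev_frame_num) state
def pvEnc : Option (Int × Int) → Int × Int
  | none => (-1, -1)
  | some q => (q.2, q.1)

theorem pvStepA_len (ba : List Int) (pt : List (List (Int × Int)))
    (st : List Int × Int × Int) (fn : Int) :
    (pvStepA ba pt st fn).1.length = st.1.length := by
  unfold pvStepA
  dsimp only
  split_ifs <;> simp

theorem pvStepA_congr (ys : List Int) (x : Int) (pt : List (List (Int × Int)))
    (st : List Int × Int × Int) (fn : Int) (h1 : 1 ≤ fn) (h2 : fn < (ys.length : Int)) :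
    pvStepA (ys ++ [x]) pt st fn = pvStepA ys pt st fn := by
  have e1 : PySem.List.pyGet? (ys ++ [x]) (fn - 1) = PySem.List.pyGet? ys (fn - 1) := by
    rw [PySem.List.pyGet?_of_nonneg _ (show (0:Int) ≤ fn - 1 by omega),
      PySem.List.pyGet?_of_nonneg _ (show (0:Int) ≤ fn - 1 by omega),
      List.getElem?_append_left (by omega)]
  have e2 : PySem.List.pyGet? (ys ++ [x]) fn = PySem.List.pyGet? ys fn := by
    rw [PySem.List.pyGet?_of_nonneg _ (show (0:Int) ≤ fn by omega),
      PySem.List.pyGet?_of_nonneg _ (show (0:Int) ≤ fn by omega),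
      List.getElem?_append_left (by omega)]
  unfold pvStepA
  rw [e1, e2]

theorem pvStepA_append (ba : List Int) (pt : List (List (Int × Int)))
    (p : List Int) (s : Int × Int) (t : Int) (fn : Int)
    (h2 : fn.toNat < p.length) :
    pvStepA ba pt (p ++ [t], s) fn =
      ((pvStepA ba pt (p, s) fn).1 ++ [t], (pvStepA ba pt (p, s) fn).2) := by
  unfold pvStepA
  dsimp only
  split_ifs <;> simp [h2]

theorem pvFoldA_append (ys : List Int) (x : Int) (pt : List (List (Int × Int))) :
    ∀ (l : List Int), (∀ fn ∈ l, 1 ≤ fn ∧ fn < (ys.length : Int)) →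
    ∀ (p : List Int) (s : Int × Int) (t : Int), p.length = ys.length →
    l.foldl (pvStepA (ys ++ [x]) pt) (p ++ [t], s) =
      ((l.foldl (pvStepA ys pt) (p, s)).1 ++ [t], (l.foldl (pvStepA ys pt) (p, s)).2) := by
  intro l
  induction l with
  | nil => intro _ p s t _; simp
  | cons fn rest ih =>
    intro hmem p s t hp
    have hfn := hmem fn (by simp)
    have hs : pvStepA (ys ++ [x]) pt (p ++ [t], s) fn =
        ((pvStepA ys pt (p, s) fn).1 ++ [t], (pvStepA ys pt (p, s) fn).2) := by
      rw [pvStepA_congr ys x pt _ fn hfn.1 hfn.2]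
      exact pvStepA_append ys pt p s t fn (by omega)
    simp only [List.foldl_cons, hs]
    have := ih (fun a ha => hmem a (by simp [ha]))
      (pvStepA ys pt (p, s) fn).1 (pvStepA ys pt (p, s) fn).2 t
      (by rw [pvStepA_len]; exact hp)
    simpa using this

theorem pvValid_append (ys : List Int) (z : Int) :
    pvValid (ys ++ [z]) = pvValid ys ++ (if z = -1 then [] else [((ys.length : Int), z)]) := by
  unfold pvValid
  rw [PySem.List.enumerate_append, List.filter_append]
  split_ifs with hz <;> simp [PySem.List.enumerate_cons, hz]

theorem pvMem_pvValid (ys : List Int) (q : Int × Int) (hq : q ∈ pvValid ys) :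
    0 ≤ q.1 ∧ q.1 < (ys.length : Int) ∧ q.2 ≠ -1 := by
  unfold pvValid at hq
  have h1 := List.of_mem_filter hq
  have h2 := List.mem_of_mem_filter hq
  rw [PySem.List.mem_enumerate_iff] at h2
  obtain ⟨k, hk, rfl⟩ := h2
  simpa using ⟨by omega, by simpa using h1⟩

-- last valid frame of ys, split at its final element
theorem pvValid_split (ys : List Int) (hys : ys ≠ []) :
    pvValid ys = pvValid ys.dropLast ++
      (if ys.getLast hys = -1 then [] else [((ys.dropLast.length : Int), ys.getLast hys)]) := by
  have h := pvValid_append ys.dropLast (ys.getLast hys)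
  rw [List.dropLast_append_getLast hys] at h
  exact h

-- B's backward scan only reads frames < j, so appending a frame never changes mark(j) below it
theorem pvMarkLoop_congr (ba1 ba2 : List Int) (pt : List (List (Int × Int))) (j bj : Int) :
    ∀ l : List Int, (∀ i ∈ l, PySem.List.pyGet? ba1 i = PySem.List.pyGet? ba2 i) →
    pvMarkLoop ba1 pt j bj l = pvMarkLoop ba2 pt j bj l := by
  intro l
  induction l with
  | nil => intro _; rfl
  | cons i rest ih =>
    intro h
    unfold pvMarkLoop
    rw [h i (by simp)]
    dsimp only
    split_ifs <;> first | rfl | exact ih (fun a ha => h a (by simp [ha]))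

theorem pvMark_congr (ys : List Int) (x : Int) (pt : List (List (Int × Int))) (j : Int)
    (h1 : 0 ≤ j) (h2 : j < (ys.length : Int)) :
    pvMark (ys ++ [x]) pt j = pvMark ys pt j := by
  have e : PySem.List.pyGet? (ys ++ [x]) j = PySem.List.pyGet? ys j := by
    rw [PySem.List.pyGet?_of_nonneg _ h1, PySem.List.pyGet?_of_nonneg _ h1,
      List.getElem?_append_left (by omega)]
  unfold pvMark
  rw [e, pvMarkLoop_congr (ys ++ [x]) ys pt j _ _ (fun i hi => by
    have := PySem.List.mem_pyRange_neg_one.mp hi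
    rw [PySem.List.pyGet?_of_nonneg _ (by omega), PySem.List.pyGet?_of_nonneg _ (by omega),
      List.getElem?_append_left (by omega)])]

theorem pvAlt_length (ba : List Int) (pt : List (List (Int × Int))) :
    (detect_passes_alt ba pt).length = ba.length := by
  unfold detect_passes_alt
  rw [List.length_map, PySem.List.length_pyRange_one]
  omega

theorem pvAlt_append (ys : List Int) (x : Int) (pt : List (List (Int × Int))) :
    detect_passes_alt (ys ++ [x]) pt =
      detect_passes_alt ys pt ++ [pvMark (ys ++ [x]) pt (ys.length : Int)] := by
  unfold detect_passes_alt
  have hlen : (((ys ++ [x]).length : Int)) = (ys.length : Int) + 1 := by simp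
  rw [hlen, PySem.List.pyRange_one_succ_right (show (0:Int) ≤ (ys.length:Int) by omega), List.map_append]
  congr 1
  refine List.map_congr_left (fun j hj => ?_)
  have := PySem.List.mem_pyRange_one.mp hj
  exact pvMark_congr ys x pt j this.1 this.2

-- B's backward scan from frame (ys.length) finds exactly the last valid frame of ys
theorem pvLoop_last (pt : List (List (Int × Int))) (j bj : Int) :
    ∀ (ys : List Int) (ba : List Int),
    (∀ (k : Nat) (h : k < ys.length), PySem.List.pyGet? ba (k : Int) = some ys[k]) →
    pvMarkLoop ba pt j bj (PySem.List.pyRange ((ys.length : Int) - 1) (-1) (-1)) =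
      match (pvValid ys).getLast? with
      | none => -1
      | some q =>
        if q.2 = bj then -1
        else
          let prev_team := pvGetTeam ((PySem.List.pyGet? pt q.1).getD []) q.2
          let cur_team := pvGetTeam ((PySem.List.pyGet? pt j).getD []) bj
          if prev_team = cur_team ∧ prev_team ≠ -1 then prev_team else -1 := by
  intro ys
  induction ys using List.reverseRecOn with
  | nil =>
    intro ba _
    rw [PySem.List.pyRange_neg_one_eq_nil (by simp)]
    simp [pvValid, pvMarkLoop, PySem.List.enumerate_nil]
  | append_singleton zs z ih =>
    intro ba hba
    have hz : PySem.List.pyGet? ba (zs.length : Int) = some z := by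
      have := hba zs.length (by simp)
      simpa using this
    have hcast : (((zs ++ [z]).length : Int)) - 1 = (zs.length : Int) := by simp
    rw [hcast, PySem.List.pyRange_neg_one_cons (by omega)]
    unfold pvMarkLoop
    rw [hz]
    simp only [Option.getD_some]
    rw [pvValid_append]
    by_cases hzv : z = -1
    · rw [if_neg (by simpa using hzv), if_pos hzv, List.append_nil]
      exact ih ba (fun k hk => by
        have := hba k (by simp; omega)
        rwa [List.getElem_append_left hk] at this)
    · rw [if_pos (by simpa using hzv), if_neg hzv]
      simp
theorem pvSet_last (l : List Int) (a b : Int) :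
    (l ++ [a]).set l.length b = l ++ [b] := by
  rw [List.set_append_right _ _ (le_refl _)]
  simp

-- A's loop computes B's per-frame marks plus the last valid frame of the prefix
theorem pvMain (pt : List (List (Int × Int))) :
    ∀ ba : List Int,
      pvFullA ba pt = (detect_passes_alt ba pt, pvEnc (pvValid ba.dropLast).getLast?) := by
  intro ba
  induction ba using List.reverseRecOn with
  | nil => simp [pvFullA, detect_passes_alt, pvValid, pvEnc, PySem.List.pyRange]
  | append_singleton ys x ih =>
    rcases eq_or_ne ys [] with rfl | hys
    · have hr : PySem.List.pyRange 1 (([x].length : Int)) 1 = [] :=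
        List.eq_nil_of_length_eq_zero (by rw [PySem.List.length_pyRange_one]; simp)
      have hr2 : PySem.List.pyRange ((0:Int) - 1) (-1) (-1) = [] :=
        PySem.List.pyRange_neg_one_eq_nil (by omega)
      have h01 : PySem.List.pyRange 0 1 1 = [0] := by
        rw [PySem.List.pyRange_one_cons (by norm_num : (0:Int) < 1),
          PySem.List.pyRange_one_eq_nil (by norm_num : (1:Int) ≤ 0 + 1)]
      by_cases hx : x = -1 <;>
        simp [pvFullA, detect_passes_alt, pvValid, pvEnc, pvMark, h01, pvMarkLoop,
          PySem.List.enumerate_nil, hx]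
    · have hn1 : 1 ≤ ys.length := List.length_pos_iff.mpr hys
      have hcast : (((ys ++ [x]).length : Int)) = (ys.length : Int) + 1 := by simp
      -- split the range of A's loop at its final frame
      have hr : PySem.List.pyRange 1 (((ys ++ [x]).length : Int)) 1 =
          PySem.List.pyRange 1 (ys.length : Int) 1 ++ [(ys.length : Int)] := by
        rw [hcast, PySem.List.pyRange_one_append 1 (ys.length : Int) ((ys.length : Int) + 1)
          (by exact_mod_cast hn1) (by omega)]
        congr 1
        rw [PySem.List.pyRange_one_cons (by omega)]
        congr 1
        exact List.eq_nil_of_length_eq_zero (by rw [PySem.List.length_pyRange_one]; omega)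
      -- the loop over frames 1..n-1 never touches the appended frame
      have hinner : (PySem.List.pyRange 1 (ys.length : Int) 1).foldl (pvStepA (ys ++ [x]) pt)
            (List.replicate (ys ++ [x]).length (-1), -1, -1)
          = (detect_passes_alt ys pt ++ [-1], pvEnc (pvValid ys.dropLast).getLast?) := by
        rw [show (ys ++ [x]).length = ys.length + 1 by simp, List.replicate_succ',
          pvFoldA_append ys x pt _
            (fun fn hfn => PySem.List.mem_pyRange_one.mp hfn)
            (List.replicate ys.length (-1)) (-1, -1) (-1) (by simp)]
        rw [show (PySem.List.pyRange 1 (ys.length : Int) 1).foldl (pvStepA ys pt)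
            (List.replicate ys.length (-1), -1, -1) = pvFullA ys pt from rfl, ih]
      unfold pvFullA
      rw [hr, List.foldl_append, hinner, List.foldl_cons, List.foldl_nil, List.dropLast_concat]
      -- B's value at the appended frame
      have hF1 : PySem.List.pyGet? (ys ++ [x]) ((ys.length : Int) - 1) =
          some (ys.getLast hys) := by
        rw [PySem.List.pyGet?_of_nonneg _ (show (0:Int) ≤ (ys.length : Int) - 1 by omega),
          List.getElem?_append_left (by omega)]
        rw [show ((ys.length : Int) - 1).toNat = ys.length - 1 by omega]
        rw [← List.getLast?_eq_getElem?, List.getLast?_eq_some_getLast hys]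
      have hF2 : PySem.List.pyGet? (ys ++ [x]) ((ys.length : Int)) = some x := by
        rw [PySem.List.pyGet?_natCast]
        exact List.getElem?_concat_length
      have hreads : ∀ (k : Nat) (h : k < ys.length),
          PySem.List.pyGet? (ys ++ [x]) (k : Int) = some ys[k] := by
        intro k hk
        rw [PySem.List.pyGet?_natCast, List.getElem?_append_left hk]
        simp [List.getElem?_eq_getElem hk]
      have hmark : pvMark (ys ++ [x]) pt ((ys.length : Int)) =
          if x = -1 then -1 else
          match (pvValid ys).getLast? with
          | none => -1
          | some q =>
            if q.2 = x then -1
            else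
              let prev_team := pvGetTeam ((PySem.List.pyGet? pt q.1).getD []) q.2
              let cur_team := pvGetTeam ((PySem.List.pyGet? pt (ys.length : Int)).getD []) x
              if prev_team = cur_team ∧ prev_team ≠ -1 then prev_team else -1 := by
        unfold pvMark
        rw [hF2]
        simp only [Option.getD_some]
        by_cases hx : x = -1
        · rw [if_pos hx, if_pos hx]
        · rw [if_neg hx, if_neg hx,
            pvLoop_last pt ((ys.length : Int)) x ys (ys ++ [x]) hreads]
      -- A's carried state after reading frame n-1 is the last valid frame of ys
      have hp : (if (PySem.List.pyGet? (ys ++ [x]) ((ys.length : Int) - 1)).getD (-1) ≠ -1 then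
            ((PySem.List.pyGet? (ys ++ [x]) ((ys.length : Int) - 1)).getD (-1), (ys.length : Int) - 1)
          else ((pvEnc (pvValid ys.dropLast).getLast?).1, (pvEnc (pvValid ys.dropLast).getLast?).2))
          = pvEnc (pvValid ys).getLast? := by
        rw [hF1]
        have hsplit := pvValid_split ys hys
        by_cases hlast : ys.getLast hys = -1
        · simp only [hlast] at hsplit
          rw [hsplit]
          simp [hlast]
        · simp only [hlast] at hsplit
          rw [hsplit]
          have : ((ys.dropLast.length : Int)) = (ys.length : Int) - 1 := by
            rw [List.length_dropLast]; omega
          simp [hlast, pvEnc]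
          omega
      rw [pvAlt_append, hmark]
      have hlenalt : (detect_passes_alt ys pt).length = ys.length := pvAlt_length ys pt
      cases hL : (pvValid ys).getLast? with
      | none =>
        have hx1 : pvStepA (ys ++ [x]) pt
            (detect_passes_alt ys pt ++ [-1], pvEnc (pvValid ys.dropLast).getLast?)
            ((ys.length : Int)) = (detect_passes_alt ys pt ++ [-1], pvEnc (pvValid ys).getLast?) := by
          unfold pvStepA
          dsimp only
          rw [hp, hL]
          simp [pvEnc]
        rw [hx1, hL]
        by_cases hx : x = -1 <;> simp [hx]
      | some q =>
        obtain ⟨f, h⟩ := q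
        obtain ⟨v', hv'⟩ := List.getLast?_eq_some_iff.mp hL
        have hmem : (f, h) ∈ pvValid ys := by rw [hv']; simp
        have hfh := pvMem_pvValid ys (f, h) hmem
        by_cases hx : x = -1
        · have hx1 : pvStepA (ys ++ [x]) pt
              (detect_passes_alt ys pt ++ [-1], pvEnc (pvValid ys.dropLast).getLast?)
              ((ys.length : Int)) = (detect_passes_alt ys pt ++ [-1], pvEnc (pvValid ys).getLast?) := by
            unfold pvStepA
            dsimp only
            rw [hp, hF2, hL]
            simp [pvEnc, hx]
          rw [hx1, hL]
          simp [hx]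
        · unfold pvStepA
          dsimp only
          rw [hp, hF2, hL]
          simp only [pvEnc, Option.getD_some, if_neg hx]
          by_cases hhx : h = x
          · rw [if_neg (by simp [hhx])]
            simp [hhx]
          · have hcond : (¬f = -1 ∧ ¬x = -1 ∧ ¬h = x) := ⟨by omega, hx, hhx⟩
            rw [if_pos hcond]
            simp only [if_neg hhx]
            split_ifs with ht
            · rw [show ((ys.length : Int)).toNat = (detect_passes_alt ys pt).length by omega,
                pvSet_last]
            · rfl

-- ===== VERDICT (by name: the statement is the Claim_ definition above) =====
theorem detect_passes_spec : Claim_equal_detect_passes := by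
  intro ba pt _ _
  unfold Spec_detect_passes detect_passes
  rw [pvMain pt ba]
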